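-- pv_equiv track=rewrite | github.com/fabiodl/eagleUlp | shrink.py | vertsToWires
-- ===== SOURCE A (Python) =====
-- def vertsToWires(verts):
--     wires = []
--     for iv in range(0, len(verts) - 1):
--         wire = (verts[iv][0], verts[iv][1],
--                 verts[iv + 1][0], verts[iv + 1][1])
--         wires.append(wire)
--     wires = [(verts[-1][0], verts[-1][1],
--               verts[0][0], verts[0][1]), ] + wires
--     return tuple(wires)
-- ===== SOURCE B (Python) =====
-- def vertsToWires(verts):
--     # Flatten the vertices into a flat coordinate stream, rotate it by two
--     # (so each vertex's predecessor coordinates line up with it), then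
--     # re-chunk the interleaved stream two entries at a time.
--     flat = [c for v in verts for c in v]
--     rot = flat[-2:] + flat[:-2]
--     it = iter(zip(rot, flat))
--     return tuple((px, py, cx, cy) for (px, cx), (py, cy) in zip(it, it))
-- ===== Notes on version B (the rewrite author's own statement) =====
-- stated objective: alternative
-- what changed: B flattens the vertices into a flat coordinate stream, rotates it by two positions, zips the rotated stream with the original, and re-chunks the interleaved pairs two at a time, instead of A's index loop over vertex pairs plus a prepended closing edge.
import Mathlib
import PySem

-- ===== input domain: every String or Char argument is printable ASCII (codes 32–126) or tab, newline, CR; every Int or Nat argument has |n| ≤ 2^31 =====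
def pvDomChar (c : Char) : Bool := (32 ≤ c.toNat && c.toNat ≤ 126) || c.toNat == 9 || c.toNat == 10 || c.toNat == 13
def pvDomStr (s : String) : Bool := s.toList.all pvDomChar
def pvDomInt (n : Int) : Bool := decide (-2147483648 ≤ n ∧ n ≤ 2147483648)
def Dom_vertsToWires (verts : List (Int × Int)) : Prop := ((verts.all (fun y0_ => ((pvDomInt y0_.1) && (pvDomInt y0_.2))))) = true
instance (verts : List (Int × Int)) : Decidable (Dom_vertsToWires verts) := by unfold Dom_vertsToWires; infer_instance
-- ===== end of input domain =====

-- B flattens the vertices into a flat coordinate stream, rotates it by two, zips and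
-- re-chunks it, instead of A's index loop plus front-prepend (alternative; same cost).


-- ===== PORT A =====
-- for iv in range(0, len(verts)-1): wires.append((verts[iv], verts[iv+1] flattened));
-- then prepend the closing edge (verts[-1] -> verts[0]). pyGetD is exact under Pre_ (verts ≠ []).
def vertsToWires (verts : List (Int × Int)) : List (Int × Int × Int × Int) :=
  let wires := (PySem.List.pyRange 0 ((verts.length : Int) - 1) 1).foldl
    (fun ws iv =>
      let c := PySem.List.pyGetD verts iv (0, 0)
      let n := PySem.List.pyGetD verts (iv + 1) (0, 0)
      ws ++ [(c.1, c.2, n.1, n.2)]) []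
  let last := PySem.List.pyGetD verts (-1) (0, 0)
  let first := PySem.List.pyGetD verts 0 (0, 0)
  (last.1, last.2, first.1, first.2) :: wires

-- ===== PORT B =====
-- zip(it, it) on an iterator pairs consecutive stream elements (a leftover odd element is
-- dropped by Python's zip, matching the fall-through branch); the generator emits one wire per pair.
def pvChunkPairs (l : List (Int × Int)) : List (Int × Int × Int × Int) :=
  match l with
  | (px, cx) :: (py, cy) :: rest => (px, py, cx, cy) :: pvChunkPairs rest
  | _ => []

-- flat = [c for v in verts for c in v]; rot = flat[-2:] + flat[:-2]; chunk zip(rot, flat).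
def vertsToWires_alt (verts : List (Int × Int)) : List (Int × Int × Int × Int) :=
  let flat := verts.flatMap (fun v => [v.1, v.2])
  let rot := PySem.List.slice flat (some (-2)) none ++ PySem.List.slice flat none (some (-2))
  pvChunkPairs (rot.zip flat)

-- ===== PRECONDITION & SPEC =====
-- Pre_ excludes only the empty list, on which A raises IndexError (verts[-1]).
def Pre_vertsToWires (verts : List (Int × Int)) : Prop := verts ≠ []
instance (verts : List (Int × Int)) : Decidable (Pre_vertsToWires verts) := by unfold Pre_vertsToWires; infer_instance
def pvWitness_vertsToWires : (List (Int × Int)) := [(1, 2), (3, 4)]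

def Spec_vertsToWires (verts : List (Int × Int)) (out : List (Int × Int × Int × Int)) : Prop := out = vertsToWires_alt verts
instance (verts : List (Int × Int)) (out : List (Int × Int × Int × Int)) : Decidable (Spec_vertsToWires verts out) := by unfold Spec_vertsToWires; infer_instance

-- ===== CLAIM (what is proved, stated in full; the proofs are below) =====
def Claim_equal_vertsToWires : Prop := ∀ (verts : List (Int × Int)), Dom_vertsToWires verts → Pre_vertsToWires verts → Spec_vertsToWires verts (vertsToWires verts)

-- ===== LEMMAS AND PROOFS =====

-- The adjacent-pairs map over indices equals the zip of dropLast with tail.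
theorem map_range_adjacent (xs : List (Int × Int)) :
    (List.range (xs.length - 1)).map
      (fun i => ((xs.getD i (0, 0)).1, (xs.getD i (0, 0)).2,
                 (xs.getD (i + 1) (0, 0)).1, (xs.getD (i + 1) (0, 0)).2))
    = (xs.dropLast.zip xs.tail).map (fun pc => (pc.1.1, pc.1.2, pc.2.1, pc.2.2)) := by
  induction xs with
  | nil => simp
  | cons a t ih =>
    cases t with
    | nil => simp
    | cons b u =>
      simp only [List.length_cons, Nat.add_sub_cancel, List.range_succ_eq_map,
        List.map_cons, List.map_map, List.dropLast_cons₂, List.zip_cons_cons,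
        List.tail_cons]
      refine congrArg₂ _ rfl ?_
      have := ih
      simp only [List.length_cons, Nat.add_sub_cancel, List.tail_cons] at this
      rw [← this]
      rfl

-- Chunking the zip of two flattened coordinate streams recovers the vertex-level zip.
theorem chunk_zip_flat (p c : List (Int × Int)) :
    pvChunkPairs ((p.flatMap (fun v => [v.1, v.2])).zip (c.flatMap (fun v => [v.1, v.2])))
    = (p.zip c).map (fun pc => (pc.1.1, pc.1.2, pc.2.1, pc.2.2)) := by
  induction p generalizing c with
  | nil => simp [pvChunkPairs]
  | cons a t ih =>
    cases c with
    | nil => simp [pvChunkPairs]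
    | cons b u => simp [pvChunkPairs, ih]

theorem flat_length (xs : List (Int × Int)) :
    (xs.flatMap (fun v => [v.1, v.2])).length = 2 * xs.length := by
  induction xs with
  | nil => simp
  | cons a t ih => simp [ih]; omega

theorem flat_take (xs : List (Int × Int)) :
    (xs.flatMap (fun v => [v.1, v.2])).take (2 * xs.length - 2)
    = xs.dropLast.flatMap (fun v => [v.1, v.2]) := by
  induction xs with
  | nil => simp
  | cons a t ih =>
    cases t with
    | nil => simp
    | cons b u =>
      have ih' := ih
      simp only [List.flatMap_cons, List.length_cons, List.cons_append, List.nil_append] at ih' ⊢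
      rw [show 2 * (u.length + 1 + 1) - 2 = (2 * (u.length + 1) - 2) + 1 + 1 by omega]
      simp [List.take_succ_cons, ih', List.dropLast_cons₂]

theorem flat_drop (xs : List (Int × Int)) (h : xs ≠ []) :
    (xs.flatMap (fun v => [v.1, v.2])).drop (2 * xs.length - 2)
    = [(xs.getLast h).1, (xs.getLast h).2] := by
  induction xs with
  | nil => exact absurd rfl h
  | cons a t ih =>
    cases t with
    | nil => simp
    | cons b u =>
      have ih' := ih (List.cons_ne_nil _ _)
      simp only [List.flatMap_cons, List.length_cons, List.cons_append, List.nil_append] at ih' ⊢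
      rw [show 2 * (u.length + 1 + 1) - 2 = (2 * (u.length + 1) - 2) + 1 + 1 by omega]
      simp only [List.drop_succ_cons]
      rw [ih']
      simp [List.getLast_cons]

theorem vertsToWires_spec : Claim_equal_vertsToWires := by
  intro verts _ hpre
  unfold Spec_vertsToWires vertsToWires vertsToWires_alt
  obtain ⟨v, vs, rfl⟩ := List.exists_cons_of_ne_nil hpre
  -- A side: the foldl-append loop is a map over the index range …
  simp only [PySem.List.foldl_append_singleton_eq_map, List.nil_append]
  have hrange : PySem.List.pyRange 0 (((v :: vs).length : Int) - 1) 1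
      = List.map (fun (k : Nat) => (k : Int)) (List.range ((v :: vs).length - 1)) := by
    have : (((v :: vs).length : Int) - 1) = (((v :: vs).length - 1 : Nat) : Int) := by
      simp [List.length_cons]
    rw [this, PySem.List.pyRange_zero_natCast]
  rw [hrange, List.map_map]
  have hmap : (List.map
      ((fun iv =>
          let c := PySem.List.pyGetD (v :: vs) iv (0, 0)
          let n := PySem.List.pyGetD (v :: vs) (iv + 1) (0, 0)
          (c.1, c.2, n.1, n.2)) ∘ (fun (k : Nat) => (k : Int))) (List.range ((v :: vs).length - 1)))
      = List.map
        (fun i => (((v :: vs).getD i (0, 0)).1, ((v :: vs).getD i (0, 0)).2,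
                   ((v :: vs).getD (i + 1) (0, 0)).1, ((v :: vs).getD (i + 1) (0, 0)).2))
        (List.range ((v :: vs).length - 1)) := by
    refine List.map_congr_left ?_
    intro i _
    have h1 : PySem.List.pyGetD (v :: vs) ((i : Int)) (0, 0) = (v :: vs).getD i (0, 0) :=
      PySem.List.pyGetD_natCast _ _ _
    have h2 : PySem.List.pyGetD (v :: vs) ((i : Int) + 1) (0, 0) = (v :: vs).getD (i + 1) (0, 0) := by
      have : ((i : Int) + 1) = ((i + 1 : Nat) : Int) := by push_cast; ring
      rw [this, PySem.List.pyGetD_natCast]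
    simp [Function.comp, h1, h2]
  rw [hmap, map_range_adjacent]
  have hlast : PySem.List.pyGetD (v :: vs) (-1) (0, 0) = (v :: vs).getLast (List.cons_ne_nil _ _) :=
    PySem.List.pyGetD_neg_one _ _ (List.cons_ne_nil _ _)
  rw [hlast]
  -- B side: the slices of the flat stream are the last vertex's pair and the dropLast stream …
  have hlen := flat_length (v :: vs)
  rw [PySem.List.slice_from_neg_ofNat _ 2 (by omega),
      PySem.List.slice_to_neg_ofNat _ 2 (by omega), hlen,
      flat_drop (v :: vs) (List.cons_ne_nil _ _), flat_take]
  -- … so rot is the flattening of (last :: dropLast); chunking its zip recovers the vertex zip.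
  rw [show ([((v :: vs).getLast (List.cons_ne_nil _ _)).1,
            ((v :: vs).getLast (List.cons_ne_nil _ _)).2] ++
           (v :: vs).dropLast.flatMap (fun v => [v.1, v.2]))
        = ((((v :: vs).getLast (List.cons_ne_nil _ _)) :: (v :: vs).dropLast).flatMap
            (fun v => [v.1, v.2])) from rfl,
      chunk_zip_flat]
  simp [PySem.List.pyGetD_zero_cons, List.zip_cons_cons]
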